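-- pv_equiv track=rewrite | github.com/takasho002/fireplaceAharaLab | fireplaceAharaLab/agent_AngryCat.py | getNegativity
-- ===== SOURCE A (Python) =====
-- def getNegativity(Vec):
-- 	myMax=-10
-- 	hisNegative=0
-- 	hisBigNegative=0
-- 	for i in range(len(Vec)):
-- 		if Vec[i]<0:
-- 			hisNegative += 1
-- 		if Vec[i]<-2:
-- 			hisBigNegative += 1
-- 		if -Vec[i]>myMax:
-- 			myMax = -Vec[i]
-- 	return myMax, hisNegative, hisBigNegative
-- ===== SOURCE B (Python) =====
-- def _bisect_left(s, t):
--     lo = 0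
--     hi = len(s)
--     while lo < hi:
--         mid = (lo + hi) // 2
--         if s[mid] < t:
--             lo = mid + 1
--         else:
--             hi = mid
--     return lo
--
-- def getNegativity(Vec):
--     # Sort once; counts of elements below a threshold become binary searches,
--     # and the capped max of negations is read off the smallest element.
--     s = sorted(Vec)
--     myMax = max(-10, -s[0]) if s else -10
--     return myMax, _bisect_left(s, 0), _bisect_left(s, -2)
-- ===== Notes on version B (the rewrite author's own statement) =====
-- stated objective: alternative
-- what changed: Replaces A's fused three-accumulator index loop by sorting the vector once and then obtaining both counts by binary search (a hand-written bisect_left) and the capped maximum of negations from the sorted head.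
import Mathlib
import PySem

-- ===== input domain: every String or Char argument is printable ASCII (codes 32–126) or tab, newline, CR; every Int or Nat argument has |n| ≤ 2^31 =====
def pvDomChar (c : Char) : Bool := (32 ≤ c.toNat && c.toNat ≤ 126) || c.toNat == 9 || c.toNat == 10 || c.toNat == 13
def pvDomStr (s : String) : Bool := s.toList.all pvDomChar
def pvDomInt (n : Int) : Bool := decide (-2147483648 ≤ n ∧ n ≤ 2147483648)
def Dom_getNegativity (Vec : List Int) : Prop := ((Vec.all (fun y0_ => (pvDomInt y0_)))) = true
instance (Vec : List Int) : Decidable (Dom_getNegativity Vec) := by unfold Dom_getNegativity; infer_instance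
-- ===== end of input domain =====

-- B sorts the vector once and reads both counts off by binary search and the capped
-- maximum of negations off the sorted head, instead of A's fused three-accumulator loop.

-- ===== PORT A =====
-- A: one index loop carrying (myMax, hisNegative, hisBigNegative); ported as a foldl over
-- the elements (Vec[i] for i in range(len(Vec)) visits exactly the elements in order).
def getNegativity (Vec : List Int) : Int × Int × Int :=
  Vec.foldl (fun st x =>
    let hisNeg := if x < 0 then st.2.1 + 1 else st.2.1
    let hisBig := if x < -2 then st.2.2 + 1 else st.2.2
    let myMax := if -x > st.1 then -x else st.1
    (myMax, hisNeg, hisBig)) (-10, 0, 0)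

-- ===== PORT B =====
-- Source B's hand-written while-loop bisect_left; `s.getD mid 0` is exact for Python's s[mid]
-- because every call keeps 0 ≤ lo ≤ mid < hi ≤ len(s) (so the index is always in range).
def pvBisectLeft (s : List Int) (t : Int) (lo hi : Nat) : Nat :=
  if _h : lo < hi then
    if s.getD ((lo + hi) / 2) 0 < t then pvBisectLeft s t ((lo + hi) / 2 + 1) hi
    else pvBisectLeft s t lo ((lo + hi) / 2)
  else lo
termination_by hi - lo
decreasing_by all_goals omega

def getNegativity_alt (Vec : List Int) : Int × Int × Int :=
  let s := PySem.List.sorted Vec (fun x => x)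
  let myMax : Int := match s with
    | [] => -10
    | x :: _ => max (-10) (-x)
  (myMax, (pvBisectLeft s 0 0 s.length : Int), (pvBisectLeft s (-2) 0 s.length : Int))

-- ===== PRECONDITION & SPEC =====
def Spec_getNegativity (Vec : List Int) (out : Int × Int × Int) : Prop := out = getNegativity_alt Vec
instance (Vec : List Int) (out : Int × Int × Int) : Decidable (Spec_getNegativity Vec out) := by unfold Spec_getNegativity; infer_instance

-- ===== CLAIM (what is proved, stated in full; the proofs are below) =====
def Claim_equal_getNegativity : Prop := ∀ (Vec : List Int), Dom_getNegativity Vec → Spec_getNegativity Vec (getNegativity Vec)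

-- ===== LEMMAS AND PROOFS =====

lemma negmax_step (a x : Int) : (if -x > a then -x else a) = max a (-x) := by
  rcases max_cases a (-x) with ⟨h1, h2⟩ | ⟨h1, h2⟩ <;> rw [h1] <;> split <;> omega

-- A's loop computes the fold-max of negations and the two counts.
lemma loop_eq (Vec : List Int) : ∀ (m n b : Int),
    Vec.foldl (fun st x =>
      let hisNeg := if x < 0 then st.2.1 + 1 else st.2.1
      let hisBig := if x < -2 then st.2.2 + 1 else st.2.2
      let myMax := if -x > st.1 then -x else st.1
      (myMax, hisNeg, hisBig)) (m, n, b)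
    = (Vec.foldl (fun a x => max a (-x)) m,
       n + (Vec.countP (fun x => decide (x < 0)) : Int),
       b + (Vec.countP (fun x => decide (x < -2)) : Int)) := by
  induction Vec with
  | nil => intro m n b; simp
  | cons x t ih =>
    intro m n b
    simp only [List.foldl_cons]
    rw [ih]
    simp only [negmax_step, List.countP_cons]
    simp only [Prod.mk.injEq]
    refine ⟨trivial, ?_, ?_⟩ <;> (split <;> simp <;> omega)

-- the fold-max of negations is invariant under permutation of the list
lemma foldl_negmax_perm {l1 l2 : List Int} (h : l1.Perm l2) :
    ∀ c : Int, l1.foldl (fun a y => max a (-y)) c = l2.foldl (fun a y => max a (-y)) c := by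
  induction h with
  | nil => intro c; rfl
  | cons x _ ih => intro c; simp only [List.foldl_cons]; exact ih _
  | swap x y l => intro c; simp only [List.foldl_cons]; rw [max_right_comm]
  | trans _ _ ih1 ih2 => intro c; rw [ih1, ih2]

-- fold-max of negations is constant once the start dominates every element's negation
lemma foldl_negmax_const (t : List Int) : ∀ (c : Int), (∀ y ∈ t, -y ≤ c) →
    t.foldl (fun a y => max a (-y)) c = c := by
  induction t with
  | nil => intro c _; rfl
  | cons y t ih =>
    intro c h
    simp only [List.foldl_cons]
    have hy : -y ≤ c := h y (by simp)
    rw [max_eq_left hy]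
    exact ih c (fun z hz => h z (by simp [hz]))

-- on a ≤-sorted list, element i is < t iff i is below the count of elements < t
lemma sorted_lt_iff (s : List Int) (hs : s.Pairwise (· ≤ ·)) (t : Int)
    (i : Nat) (hi : i < s.length) :
    s[i] < t ↔ i < s.countP (fun x => decide (x < t)) := by
  constructor
  · intro hx
    have hsplit : s.countP (fun x => decide (x < t)) =
        (s.take (i+1)).countP (fun x => decide (x < t)) +
        (s.drop (i+1)).countP (fun x => decide (x < t)) := by
      rw [← List.countP_append, List.take_append_drop]
    have htlen : (s.take (i+1)).length = i + 1 := by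
      rw [List.length_take]; omega
    have hall : ∀ y ∈ s.take (i+1), (fun x => decide (x < t)) y = true := by
      intro y hy
      obtain ⟨j, hj, rfl⟩ := List.getElem_of_mem hy
      have hji : j ≤ i := by omega
      have hjlen : j < s.length := by omega
      rw [List.getElem_take]
      rcases Nat.lt_or_ge j i with hlt | hge
      · have := (List.pairwise_iff_getElem.mp hs) j i hjlen hi hlt
        simp only [decide_eq_true_eq]; omega
      · have : j = i := by omega
        subst this; simp only [decide_eq_true_eq]; omega
    have : (s.take (i+1)).countP (fun x => decide (x < t)) = i + 1 := by
      rw [List.countP_eq_length.mpr hall, htlen]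
    omega
  · intro hk
    by_contra hx
    have hx' : t ≤ s[i] := not_lt.mp hx
    have hdlen : (s.drop i).length = s.length - i := by
      rw [List.length_drop]
    have hz : (s.drop i).countP (fun x => decide (x < t)) = 0 := by
      rw [List.countP_eq_zero]
      intro y hy
      obtain ⟨j, hj, rfl⟩ := List.getElem_of_mem hy
      have hjlen : i + j < s.length := by omega
      rw [List.getElem_drop]
      simp only [decide_eq_true_eq, not_lt]
      rcases Nat.eq_zero_or_pos j with rfl | hpos
      · simpa using hx'
      · have := (List.pairwise_iff_getElem.mp hs) i (i + j) hi hjlen (by omega)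
        omega
    have hsplit : s.countP (fun x => decide (x < t)) =
        (s.take i).countP (fun x => decide (x < t)) +
        (s.drop i).countP (fun x => decide (x < t)) := by
      rw [← List.countP_append, List.take_append_drop]
    have : (s.take i).countP (fun x => decide (x < t)) ≤ i := by
      calc (s.take i).countP (fun x => decide (x < t)) ≤ (s.take i).length :=
            List.countP_le_length
        _ ≤ i := by rw [List.length_take]; omega
    omega

-- the binary search lands exactly on the count, given the bracketing invariant
lemma pvBisectLeft_eq (s : List Int) (hs : s.Pairwise (· ≤ ·)) (t : Int) :
    ∀ (lo hi : Nat), lo ≤ s.countP (fun x => decide (x < t)) →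
      s.countP (fun x => decide (x < t)) ≤ hi → hi ≤ s.length →
      pvBisectLeft s t lo hi = s.countP (fun x => decide (x < t)) := by
  intro lo hi
  induction hn : hi - lo using Nat.strong_induction_on generalizing lo hi with
  | _ n ih =>
    intro hlo hhi hlen
    unfold pvBisectLeft
    split
    · next h =>
      have hmid : (lo + hi) / 2 < s.length := by omega
      rw [List.getD_eq_getElem s 0 hmid]
      have hiff := sorted_lt_iff s hs t ((lo + hi) / 2) hmid
      split
      · next hlt =>
        have : (lo + hi) / 2 < s.countP (fun x => decide (x < t)) := hiff.mp hlt
        exact ih (hi - ((lo + hi) / 2 + 1)) (by omega) _ _ rfl (by omega) hhi hlen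
      · next hge =>
        have : s.countP (fun x => decide (x < t)) ≤ (lo + hi) / 2 := by
          by_contra hc
          exact hge (hiff.mpr (not_le.mp hc))
        exact ih ((lo + hi) / 2 - lo) (by omega) _ _ rfl hlo this (by omega)
    · next h => omega

-- ===== VERDICT (by name: the statement is the Claim_ definition above) =====
theorem getNegativity_spec : Claim_equal_getNegativity := by
  intro Vec _
  show getNegativity Vec = getNegativity_alt Vec
  unfold getNegativity
  rw [loop_eq]
  have hperm := PySem.List.sorted_perm Vec (fun x => x) false
  have hpw : (PySem.List.sorted Vec (fun x => x)).Pairwise (· ≤ ·) := by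
    simpa using PySem.List.sorted_pairwise Vec (fun x => x)
  have hb0 : (pvBisectLeft (PySem.List.sorted Vec (fun x => x)) 0 0
        (PySem.List.sorted Vec (fun x => x)).length : Int)
      = (Vec.countP (fun x => decide (x < 0)) : Int) := by
    rw [pvBisectLeft_eq _ hpw 0 0 _ (Nat.zero_le _) List.countP_le_length le_rfl,
      hperm.countP_eq]
  have hb2 : (pvBisectLeft (PySem.List.sorted Vec (fun x => x)) (-2) 0
        (PySem.List.sorted Vec (fun x => x)).length : Int)
      = (Vec.countP (fun x => decide (x < -2)) : Int) := by
    rw [pvBisectLeft_eq _ hpw (-2) 0 _ (Nat.zero_le _) List.countP_le_length le_rfl,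
      hperm.countP_eq]
  have hmax : Vec.foldl (fun a x => max a (-x)) (-10)
      = (match PySem.List.sorted Vec (fun x => x) with
        | [] => (-10 : Int)
        | x :: _ => max (-10) (-x)) := by
    rw [← foldl_negmax_perm hperm (-10)]
    cases hsv : PySem.List.sorted Vec (fun x => x) with
    | nil => simp
    | cons x tl =>
      have hhead := PySem.List.key_head_sorted_le Vec (fun x => x) hsv
      simp only [List.foldl_cons]
      apply foldl_negmax_const
      intro y hy
      have hyv : y ∈ Vec := hperm.mem_iff.mp (by rw [hsv]; simp [hy])
      have hxy : x ≤ y := hhead y hyv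
      exact le_max_of_le_right (by omega)
  have halt : getNegativity_alt Vec =
      ((match PySem.List.sorted Vec (fun x => x) with
        | [] => (-10 : Int)
        | x :: _ => max (-10) (-x)),
       (pvBisectLeft (PySem.List.sorted Vec (fun x => x)) 0 0
          (PySem.List.sorted Vec (fun x => x)).length : Int),
       (pvBisectLeft (PySem.List.sorted Vec (fun x => x)) (-2) 0
          (PySem.List.sorted Vec (fun x => x)).length : Int)) := rfl
  rw [halt, hb0, hb2, ← hmax]
  norm_num
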